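-- pv_equiv track=rewrite | github.com/alleyne234/nsi | EP/ep_recherche.py | recherche_a
-- ===== SOURCE A (Python) =====
-- def recherche_a(tab, n):
--     """Renvoie l'indice de la dernière occurence de l'élément n cherché.
--     Si l'élément n'est pas présent, la fonction renvoie la longueur du tableau.
--     : tab : (list)
--     : n : (int)
--     @ return indice ou longueur du tableau
--     """
--     i = len(tab) - 1
--     while i >= 0:
--         if tab[i] == n:
--             return i
--         else:
--             i = i - 1
--     return len(tab)
-- ===== SOURCE B (Python) =====
-- def recherche_a(tab, n):
--     result = len(tab)
--     for i in range(len(tab)):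
--         if tab[i] == n:
--             result = i
--     return result
-- ===== Notes on version B (the rewrite author's own statement) =====
-- stated objective: alternative
-- what changed: Replaces the backward early-return while-loop with a forward for-loop over range(len(tab)) that maintains a 'last matching index' accumulator initialized to len(tab).
import Mathlib
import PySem

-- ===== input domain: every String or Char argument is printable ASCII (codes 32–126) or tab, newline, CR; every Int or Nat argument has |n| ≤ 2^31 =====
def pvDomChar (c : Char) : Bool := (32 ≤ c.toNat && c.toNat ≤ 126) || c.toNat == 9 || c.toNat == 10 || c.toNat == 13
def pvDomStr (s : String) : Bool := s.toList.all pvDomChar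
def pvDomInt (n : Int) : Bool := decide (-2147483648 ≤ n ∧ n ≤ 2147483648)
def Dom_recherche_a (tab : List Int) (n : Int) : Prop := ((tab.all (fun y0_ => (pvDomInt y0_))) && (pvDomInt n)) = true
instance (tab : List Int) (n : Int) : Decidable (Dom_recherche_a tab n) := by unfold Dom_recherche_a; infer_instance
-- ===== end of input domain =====

-- B replaces A's backward early-return scan by a forward pass keeping a 'last match' accumulator; same result, alternative decomposition.

-- ===== PORT A =====
-- A's while-loop counts i down from len(tab)-1, returning at the first (i.e. last) match;
-- modelled by structural recursion on i+1 (the index accessed is i, always in range, so getD is exact here).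
def rechercheALoop (tab : List Int) (n : Int) : Nat → Int
  | 0 => (tab.length : Int)
  | (i+1) => if tab.getD i 0 = n then (i : Int) else rechercheALoop tab n i

def recherche_a (tab : List Int) (n : Int) : Int :=
  rechercheALoop tab n tab.length

-- ===== PORT B =====
-- forward for-loop over range(len(tab)), overwriting result on each match
def recherche_a_alt (tab : List Int) (n : Int) : Int :=
  (List.range tab.length).foldl
    (fun result i => if tab.getD i 0 = n then (i : Int) else result)
    (tab.length : Int)

-- ===== PRECONDITION & SPEC =====
def Spec_recherche_a (tab : List Int) (n : Int) (out : Int) : Prop := out = recherche_a_alt tab n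
instance (tab : List Int) (n : Int) (out : Int) : Decidable (Spec_recherche_a tab n out) := by unfold Spec_recherche_a; infer_instance

-- ===== CLAIM (what is proved, stated in full; the proofs are below) =====
def Claim_equal_recherche_a : Prop := ∀ (tab : List Int) (n : Int), Dom_recherche_a tab n → Spec_recherche_a tab n (recherche_a tab n)

-- ===== LEMMAS AND PROOFS =====
theorem rechercheALoop_eq_foldl (tab : List Int) (n : Int) (k : Nat) :
    rechercheALoop tab n k =
      (List.range k).foldl
        (fun result i => if tab.getD i 0 = n then (i : Int) else result)
        (tab.length : Int) := by
  induction k with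
  | zero => simp [rechercheALoop]
  | succ i ih => simp [rechercheALoop, List.range_succ, ih]

-- ===== VERDICT (by name: the statement is the Claim_ definition above) =====
theorem recherche_a_spec : Claim_equal_recherche_a := by
  intro tab n _
  unfold Spec_recherche_a recherche_a recherche_a_alt
  exact rechercheALoop_eq_foldl tab n tab.length
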